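-- pv_equiv track=rewrite | github.com/chimy2/CodingTest | Practice/src/coding_basic_training/CreateArray4.py | solution
-- ===== SOURCE A (Python) =====
-- def solution(arr):
--     stk = []
--     i = 0
--     while i < len(arr):
--         if not stk or arr[i] > stk[-1]:
--             stk.append(arr[i])
--             i += 1
--         else:
--             stk.pop()
--     return stk
-- ===== SOURCE B (Python) =====
-- def solution(arr):
--     res = []
--     m = None
--     for x in reversed(arr):
--         if m is None or x < m:
--             res.append(x)
--             m = x
--     res.reverse()
--     return res
-- ===== Notes on version B (the rewrite author's own statement) =====
-- stated objective: faster
-- what changed: Replaced the push/pop monotone stack loop (each element may be pushed and popped) by a single right-to-left pass keeping elements strictly below the running minimum, then one reversal.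
import Mathlib
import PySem

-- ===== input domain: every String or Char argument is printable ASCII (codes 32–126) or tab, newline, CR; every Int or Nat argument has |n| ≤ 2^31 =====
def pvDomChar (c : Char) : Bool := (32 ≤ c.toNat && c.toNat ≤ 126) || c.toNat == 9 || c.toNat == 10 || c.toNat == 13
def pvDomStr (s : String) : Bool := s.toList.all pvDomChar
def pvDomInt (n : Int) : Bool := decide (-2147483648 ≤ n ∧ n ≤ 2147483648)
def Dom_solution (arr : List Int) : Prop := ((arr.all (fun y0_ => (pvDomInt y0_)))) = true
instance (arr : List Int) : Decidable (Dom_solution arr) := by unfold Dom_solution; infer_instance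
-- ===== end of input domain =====

-- B replaces A's push/pop stack loop with one right-to-left pass tracking a running minimum (objective: faster by constant factor / simpler traversal).

-- ===== PORT A =====
-- while-loop with state (stk, i); stk.append x = stk ++ [x], stk[-1] = getLastD, stk.pop() = dropLast
def solutionLoop (arr : List Int) (stk : List Int) (i : Nat) : List Int :=
  if h : i < arr.length then
    if stk = [] ∨ stk.getLastD 0 < arr.getD i 0 then
      solutionLoop arr (stk ++ [arr.getD i 0]) (i + 1)
    else
      solutionLoop arr stk.dropLast i
  else stk
termination_by (arr.length - i) * 2 + stk.length
decreasing_by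
  · simp; omega
  · rename_i hc
    have hne : stk ≠ [] := by intro he; exact hc (Or.inl he)
    have : stk.dropLast.length = stk.length - 1 := by simp
    have hl : 0 < stk.length := List.length_pos_iff.mpr hne
    omega

def solution (arr : List Int) : List Int := solutionLoop arr [] 0

-- ===== PORT B =====
-- fold over reversed arr with state (res, running minimum m); final reversal
def solution_alt (arr : List Int) : List Int :=
  let st := arr.reverse.foldl (fun (p : List Int × Option Int) x =>
    match p.2 with
    | none => (p.1 ++ [x], some x)
    | some m => if x < m then (p.1 ++ [x], some x) else p) ([], none)
  st.1.reverse

-- ===== PRECONDITION & SPEC =====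
def Spec_solution (arr : List Int) (out : List Int) : Prop := out = solution_alt arr
instance (arr : List Int) (out : List Int) : Decidable (Spec_solution arr out) := by unfold Spec_solution; infer_instance

-- ===== CLAIM (what is proved, stated in full; the proofs are below) =====
def Claim_equal_solution : Prop := ∀ (arr : List Int), Dom_solution arr → Spec_solution arr (solution arr)

-- ===== LEMMAS AND PROOFS =====

-- common specification: keep x iff x is strictly below everything after it,
-- and (when m = some v) strictly below v
def okm (m : Option Int) (x : Int) : Bool :=
  match m with
  | none => true
  | some v => decide (x < v)

def gb : List Int → Option Int → List Int
  | [], _ => []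
  | x :: xs, m => if (xs.all (fun z => decide (x < z))) && okm m x then x :: gb xs m else gb xs m

-- updated minimum after seeing x
def mmin (m : Option Int) (x : Int) : Option Int :=
  match m with
  | none => some x
  | some v => some (min v x)

theorem gb_snoc (ys : List Int) (x : Int) (m : Option Int) :
    gb (ys ++ [x]) m = gb ys (mmin m x) ++ (if okm m x then [x] else []) := by
  induction ys with
  | nil => simp [gb]
  | cons y ys ih =>
    simp only [List.cons_append, gb, List.all_append, List.all_cons, List.all_nil, ih]
    have hcond : ((ys.all fun z => decide (y < z)) && (decide (y < x) && true) && okm m y)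
        = ((ys.all fun z => decide (y < z)) && okm (mmin m x) y) := by
      cases m with
      | none => simp [okm, mmin, Bool.and_comm]
      | some v =>
        simp only [okm, mmin]
        by_cases h1 : y < x <;> by_cases h2 : y < v <;>
          simp [h1, h2]
    rw [hcond]
    split <;> simp

-- A's loop computes: elements of stk still below everything remaining, then gb of the rest
theorem drop_getD_cons (arr : List Int) (i : Nat) (h : i < arr.length) :
    arr.drop i = arr.getD i 0 :: arr.drop (i + 1) := by
  rw [List.getD_eq_getElem _ _ h]
  exact (List.getElem_cons_drop h).symm

theorem solutionLoop_eq (arr : List Int) : ∀ i stk,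
    List.Pairwise (· < ·) stk →
    solutionLoop arr stk i
      = stk.filter (fun y => (arr.drop i).all (fun z => decide (y < z))) ++ gb (arr.drop i) none := by
  intro i stk
  induction stk, i using solutionLoop.induct arr with
  | case1 stk i h hc ih =>
    intro hp
    have hdrop := drop_getD_cons arr i h
    have hall : ∀ y ∈ stk, y < arr.getD i 0 := by
      intro y hy
      rcases hc with hnil | hlt
      · simp [hnil] at hy
      · rcases List.eq_nil_or_concat stk with rfl | ⟨zs, z, rfl⟩
        · simp at hy
        · simp only [List.concat_eq_append] at hp hy hlt
          have hz : (zs ++ [z]).getLastD 0 = z := by simp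
          rw [hz] at hlt
          rcases List.mem_append.mp hy with hyz | hyz
          · have := (List.pairwise_append.mp hp).2.2 y hyz z (by simp)
            exact lt_trans this hlt
          · simp at hyz; subst hyz; exact hlt
    rw [solutionLoop]
    simp only [h, dif_pos, hc, if_pos]
    have hp' : List.Pairwise (· < ·) (stk ++ [arr.getD i 0]) := by
      rw [List.pairwise_append]
      exact ⟨hp, by simp, by simpa using hall⟩
    rw [ih hp', hdrop]
    have hfil : stk.filter (fun y => (arr.drop (i+1)).all (fun z => decide (y < z)))
        = stk.filter (fun y => (arr.getD i 0 :: arr.drop (i+1)).all (fun z => decide (y < z))) := by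
      apply List.filter_congr
      intro y hy
      simp only [List.all_cons]
      rw [decide_eq_true (hall y hy)]
      simp
    rw [List.filter_append, ← hfil, List.append_assoc]
    congr 1
    rw [List.filter_singleton]
    by_cases hx : ((arr.drop (i+1)).all (fun z => decide (arr.getD i 0 < z))) = true
    · rw [hx, cond_true]
      simp only [gb, okm, Bool.and_true, hx, if_pos]
      rfl
    · rw [Bool.not_eq_true] at hx
      rw [hx, cond_false]
      simp only [gb, okm, Bool.and_true, hx]
      rfl
  | case2 stk i h hc ih =>
    intro hp
    have hne : stk ≠ [] := fun he => hc (Or.inl he)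
    rcases List.eq_nil_or_concat stk with rfl | ⟨zs, z, rfl⟩
    · exact absurd rfl hne
    simp only [List.concat_eq_append] at hp hc ih ⊢
    have hz : (zs ++ [z]).getLastD 0 = z := by simp
    have hge : ¬ z < arr.getD i 0 := by
      intro hlt; exact hc (Or.inr (by rw [hz]; exact hlt))
    have hdrop := drop_getD_cons arr i h
    rw [solutionLoop]
    rw [dif_pos h, if_neg hc]
    have hp' : List.Pairwise (· < ·) (zs ++ [z]).dropLast := by
      have hdl : (zs ++ [z]).dropLast = zs := by simp
      rw [hdl]
      exact (List.pairwise_append.mp hp).1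
    rw [ih hp']
    congr 1
    have hdl : (zs ++ [z]).dropLast = zs := by simp
    rw [hdl, List.filter_append]
    have hone : (List.filter (fun y => (arr.drop i).all (fun z => decide (y < z))) [z]) = [] := by
      rw [List.filter_singleton]
      have hfalse : ((arr.drop i).all (fun w => decide (z < w))) = false := by
        rw [hdrop]
        simp only [List.all_cons, Bool.and_eq_false_iff]
        left
        simpa using hge
      rw [hfalse, cond_false]
    rw [hone, List.append_nil]
  | case3 stk i h =>
    intro _
    rw [solutionLoop]
    rw [dif_neg h]
    have hd : arr.drop i = [] := List.drop_eq_nil_of_le (by omega)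
    rw [hd]
    simp [gb]

-- B's fold computes gb of the reversed remainder (reversed)
theorem fold_eq (l : List Int) : ∀ res m,
    (l.foldl (fun (p : List Int × Option Int) x =>
      match p.2 with
      | none => (p.1 ++ [x], some x)
      | some m => if x < m then (p.1 ++ [x], some x) else p) (res, m)).1
      = res ++ (gb l.reverse m).reverse := by
  induction l with
  | nil => intro res m; simp [gb]
  | cons x l ih =>
    intro res m
    have hsnoc := gb_snoc l.reverse x m
    cases m with
    | none =>
      simp only [List.foldl_cons, ih, List.reverse_cons, hsnoc, okm, if_pos, mmin]
      simp
    | some v =>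
      by_cases hx : x < v
      · simp only [List.foldl_cons, if_pos hx, ih, List.reverse_cons, hsnoc]
        have : okm (some v) x = true := by simp [okm, hx]
        have hm : mmin (some v) x = some x := by simp [mmin, min_eq_right (le_of_lt hx)]
        rw [this, hm]
        simp
      · simp only [List.foldl_cons, if_neg hx, ih, List.reverse_cons, hsnoc]
        have : okm (some v) x = false := by simp [okm, hx]
        have hm : mmin (some v) x = some v := by
          simp [mmin, min_eq_left (le_of_not_gt hx)]
        rw [this, hm]
        simp

theorem solution_alt_eq (arr : List Int) : solution_alt arr = gb arr none := by
  unfold solution_alt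
  show (arr.reverse.foldl (fun (p : List Int × Option Int) x =>
    match p.2 with
    | none => (p.1 ++ [x], some x)
    | some m => if x < m then (p.1 ++ [x], some x) else p) ([], none)).1.reverse = gb arr none
  rw [fold_eq arr.reverse [] none]
  simp

-- ===== VERDICT (by name: the statement is the Claim_ definition above) =====
theorem solution_spec : Claim_equal_solution := by
  intro arr _
  unfold Spec_solution solution
  rw [solutionLoop_eq arr 0 [] (by simp), solution_alt_eq]
  simp
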